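-- pv_equiv track=rewrite | github.com/23205856-pixel/Proyectos-Semanas-Benjamin-Villase-or | Semana3/S3/codigo/analysis.py | find_most_connected_vertex
-- ===== SOURCE A (Python) =====
-- def get_out_degree(graph, vertex):
--     return len(graph.get(vertex, []))
--
-- def get_in_degree(graph, vertex):
--     in_degree = 0
--     for neighbors in graph.values():
--         in_degree += sum(1 for neighbor, _ in neighbors if neighbor == vertex)
--     return in_degree
--
-- def find_most_connected_vertex(graph):
--     if not graph:
--         return ""
--
--     best = ""
--     max_deg = -1
--
--     for vertex in graph:
--         total = get_in_degree(graph, vertex) + get_out_degree(graph, vertex)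
--         if total > max_deg:
--             max_deg = total
--             best = vertex
--
--     return best
-- ===== SOURCE B (Python) =====
-- def find_most_connected_vertex(graph):
--     if not graph:
--         return ""
--
--     # one pass over all edges: in-degree of every vertex
--     indeg = {}
--     for neighbors in graph.values():
--         for neighbor, _ in neighbors:
--             indeg[neighbor] = indeg.get(neighbor, 0) + 1
--
--     best = ""
--     max_deg = -1
--     for vertex, neighbors in graph.items():
--         total = indeg.get(vertex, 0) + len(neighbors)
--         if total > max_deg:
--             max_deg = total
--             best = vertex
--     return best
-- ===== Notes on version B (the rewrite author's own statement) =====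
-- stated objective: faster
-- what changed: Instead of rescanning every adjacency list for every vertex (get_in_degree inside the vertex loop), B builds an in-degree counter dict in one pass over all edges and then scans the vertices once, reading the out-degree from the vertex's own adjacency list.
import Mathlib
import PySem

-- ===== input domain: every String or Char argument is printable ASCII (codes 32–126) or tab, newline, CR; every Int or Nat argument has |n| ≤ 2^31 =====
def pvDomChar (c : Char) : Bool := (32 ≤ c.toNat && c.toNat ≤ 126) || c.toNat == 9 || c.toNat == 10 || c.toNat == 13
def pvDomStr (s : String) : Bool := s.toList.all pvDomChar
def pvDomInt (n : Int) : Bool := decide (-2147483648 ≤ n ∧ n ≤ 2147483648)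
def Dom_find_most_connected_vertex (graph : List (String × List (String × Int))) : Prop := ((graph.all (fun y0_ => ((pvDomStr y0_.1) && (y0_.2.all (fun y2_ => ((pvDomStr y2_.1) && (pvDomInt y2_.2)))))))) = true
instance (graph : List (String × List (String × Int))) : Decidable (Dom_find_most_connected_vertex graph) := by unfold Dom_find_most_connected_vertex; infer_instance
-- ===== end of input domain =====

-- B replaces A's per-vertex rescan of all adjacency lists by a single in-degree
-- counter built in one pass over the edges (objective: faster).

-- ===== PORT A =====
-- get_out_degree: len(graph.get(vertex, []))
def pv_get_out_degree (graph : List (String × List (String × Int))) (v : String) : Int :=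
  ((PySem.Dict.mk graph).getD v []).length

-- get_in_degree: for neighbors in graph.values(): in_degree += sum(1 for n,_ in neighbors if n == vertex)
def pv_get_in_degree (graph : List (String × List (String × Int))) (v : String) : Int :=
  graph.foldl (fun acc e => acc + ((e.2.filter (fun p => p.1 == v)).length : Int)) 0

def find_most_connected_vertex (graph : List (String × List (String × Int))) : String :=
  if graph = [] then ""
  else
    (graph.foldl (fun st e =>
      let total := pv_get_in_degree graph e.1 + pv_get_out_degree graph e.1
      if st.2 < total then (e.1, total) else st) ("", -1)).1

-- ===== PORT B =====
-- one pass over all edges: indeg[neighbor] = indeg.get(neighbor, 0) + 1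
def pv_indeg (graph : List (String × List (String × Int))) : PySem.Dict String Int :=
  graph.foldl (fun d e => e.2.foldl (fun d p => d.insert p.1 (d.getD p.1 0 + 1)) d) PySem.Dict.empty

def find_most_connected_vertex_alt (graph : List (String × List (String × Int))) : String :=
  if graph = [] then ""
  else
    let indeg := pv_indeg graph
    (graph.foldl (fun st e =>
      let total := indeg.getD e.1 0 + (e.2.length : Int)
      if st.2 < total then (e.1, total) else st) ("", -1)).1

-- ===== PRECONDITION & SPEC =====
-- Pre_ excludes association lists with duplicate keys: they do not denote a Python
-- dict (a dict collapses duplicate keys), so the list encoding of A's input is only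
-- meaningful on lists whose keys are distinct.
def Pre_find_most_connected_vertex (graph : List (String × List (String × Int))) : Prop :=
  (graph.map Prod.fst).Nodup
instance (graph : List (String × List (String × Int))) : Decidable (Pre_find_most_connected_vertex graph) := by
  unfold Pre_find_most_connected_vertex; infer_instance

def pvWitness_find_most_connected_vertex : (List (String × List (String × Int))) :=
  [("a", [("b", 1)]), ("b", [])]

def Spec_find_most_connected_vertex (graph : List (String × List (String × Int))) (out : String) : Prop := out = find_most_connected_vertex_alt graph
instance (graph : List (String × List (String × Int))) (out : String) : Decidable (Spec_find_most_connected_vertex graph out) := by unfold Spec_find_most_connected_vertex; infer_instance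

-- ===== CLAIM (what is proved, stated in full; the proofs are below) =====
def Claim_equal_find_most_connected_vertex : Prop := ∀ (graph : List (String × List (String × Int))), Dom_find_most_connected_vertex graph → Pre_find_most_connected_vertex graph → Spec_find_most_connected_vertex graph (find_most_connected_vertex graph)

-- ===== LEMMAS AND PROOFS =====

-- the counter dict built by B reads back exactly A's in-degree sum
theorem pv_indeg_getD (graph : List (String × List (String × Int)))
    (d : PySem.Dict String Int) (v : String) :
    (graph.foldl (fun d e => e.2.foldl (fun d p => d.insert p.1 (d.getD p.1 0 + 1)) d) d).getD v 0
      = d.getD v 0 + pv_get_in_degree graph v := by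
  induction graph generalizing d with
  | nil => simp [pv_get_in_degree]
  | cons e t ih =>
      simp only [List.foldl_cons, ih]
      have h1 : e.2.foldl (fun d p => d.insert p.1 (d.getD p.1 0 + 1)) d
          = (e.2.map Prod.fst).foldl (fun d x => d.insert x (d.getD x 0 + 1)) d := by
        rw [List.foldl_map]
      rw [h1, PySem.Dict.getD_foldl_insert_add_one]
      have h2 : List.count v (e.2.map Prod.fst) = (e.2.filter (fun p => p.1 == v)).length := by
        rw [List.count_eq_countP, List.countP_map, List.countP_eq_length_filter]; rfl
      have h3 : ∀ (l : List (String × List (String × Int))) (init : Int),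
          l.foldl (fun acc e => acc + ((e.2.filter (fun p => p.1 == v)).length : Int)) init
            = init + (l.map (fun e => ((e.2.filter (fun p => p.1 == v)).length : Int))).sum := by
        intro l init
        exact PySem.List.foldl_add l _ init
      simp only [pv_get_in_degree, h3, h2, List.map_cons, List.sum_cons]
      ring

-- with distinct keys, A's dict lookup of a key's adjacency list is the entry's own list
theorem pv_out_eq (graph : List (String × List (String × Int)))
    (hnd : (graph.map Prod.fst).Nodup) (e : String × List (String × Int)) (he : e ∈ graph) :
    pv_get_out_degree graph e.1 = (e.2.length : Int) := by
  unfold pv_get_out_degree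
  have hitems : (PySem.Dict.mk graph).items = graph := rfl
  have hkeys : (PySem.Dict.mk graph).keys.Nodup := by
    have : (PySem.Dict.mk graph).keys = graph.map Prod.fst := rfl
    rw [this]; exact hnd
  have : (PySem.Dict.mk graph).getD e.1 [] = e.2 := by
    exact PySem.Dict.getD_of_mem_items _ (by rw [hitems]; exact he) hkeys []
  rw [this]

-- ===== VERDICT (by name: the statement is the Claim_ definition above) =====
theorem find_most_connected_vertex_spec : Claim_equal_find_most_connected_vertex := by
  intro graph _ hpre
  unfold Spec_find_most_connected_vertex find_most_connected_vertex find_most_connected_vertex_alt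
  by_cases hg : graph = []
  · simp [hg]
  · simp only [hg, if_false]
    congr 1
    apply PySem.List.foldl_congr_mem
    intro acc e he
    have hin : pv_get_in_degree graph e.1 = (pv_indeg graph).getD e.1 0 := by
      unfold pv_indeg
      rw [pv_indeg_getD]
      simp [PySem.Dict.getD_empty]
    rw [hin, pv_out_eq graph hpre e he]
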